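-- pv_equiv track=rewrite | github.com/RasmusBroborg/2020-06-19-LearningToCallFunctionsInsideOfClasses | coding_challenges/cb_string-1.py | without_end
-- ===== SOURCE A (Python) =====
-- def without_end(text):
--     new_text = ""
--     for i in range(len(text)):
--         if i == 0 or i == len(text) - 1:
--             continue
--         else:
--             new_text += text[i]
--     return new_text
-- ===== SOURCE B (Python) =====
-- def without_end(text):
--     return text[1:-1]
-- ===== Notes on version B (the rewrite author's own statement) =====
-- stated objective: idiomatic
-- what changed: Replaced the character-by-character index loop with skip conditions by the single closed-form slice text[1:-1].
import Mathlib
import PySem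

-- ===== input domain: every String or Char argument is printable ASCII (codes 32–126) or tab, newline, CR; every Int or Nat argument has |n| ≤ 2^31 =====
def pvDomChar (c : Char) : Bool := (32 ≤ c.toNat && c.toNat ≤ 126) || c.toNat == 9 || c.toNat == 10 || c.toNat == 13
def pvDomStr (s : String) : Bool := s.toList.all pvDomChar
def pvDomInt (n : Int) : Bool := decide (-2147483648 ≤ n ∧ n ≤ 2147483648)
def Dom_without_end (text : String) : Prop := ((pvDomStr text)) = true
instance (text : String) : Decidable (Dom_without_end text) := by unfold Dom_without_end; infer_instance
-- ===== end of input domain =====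

-- B replaces A's index loop (skip first/last index, append the rest) by the closed-form slice text[1:-1]; objective: idiomatic.

-- ===== PORT A =====
-- new_text = ""; for i in range(len(text)): if i == 0 or i == len(text)-1: continue else new_text += text[i]
def without_end (text : String) : String :=
  String.ofList ((PySem.List.pyRange 0 (PySem.Str.len text) 1).foldl
    (fun new_text i =>
      if i == 0 || i == PySem.Str.len text - 1 then new_text
      else new_text ++ (PySem.List.pyGet? text.toList i).toList) [])

-- ===== PORT B =====
-- return text[1:-1]
def without_end_alt (text : String) : String :=
  String.ofList (PySem.List.slice text.toList (some 1) (some (-1)))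

-- ===== PRECONDITION & SPEC =====
def Spec_without_end (text : String) (out : String) : Prop := out = without_end_alt text
instance (text : String) (out : String) : Decidable (Spec_without_end text out) := by unfold Spec_without_end; infer_instance

-- ===== CLAIM (what is proved, stated in full; the proofs are below) =====
def Claim_equal_without_end : Prop := ∀ (text : String), Dom_without_end text → Spec_without_end text (without_end text)

-- ===== LEMMAS AND PROOFS =====

-- B's slice text[1:-1] in closed form: drop the head, drop the last element.
theorem slice_one_neg_one (cs : List Char) :
    PySem.List.slice cs (some 1) (some (-1)) = cs.tail.dropLast := by
  cases cs with
  | nil => simp [PySem.List.slice]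
  | cons c rest => simp [PySem.List.slice, List.dropLast_eq_take]

-- appending one element at a time from acc is acc ++ xs
theorem foldl_append_id (xs acc : List Char) :
    xs.foldl (fun a x => a ++ [x]) acc = acc ++ xs := by
  induction xs generalizing acc with
  | nil => simp
  | cons x rest ih => simp [ih]

-- A's loop in closed form.
theorem loop_eq (cs : List Char) :
    (PySem.List.pyRange 0 (cs.length : Int) 1).foldl
      (fun new_text i =>
        if i == 0 || i == (cs.length : Int) - 1 then new_text
        else new_text ++ (PySem.List.pyGet? cs i).toList) []
      = cs.tail.dropLast := by
  rcases cs with _ | ⟨c, rest⟩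
  · simp [PySem.List.pyRange_one_eq_nil]
  rcases rest.eq_nil_or_concat with h | ⟨mid, d, h⟩
  · subst h
    have h1 : PySem.List.pyRange 0 1 1 = [0] := by decide
    simp [h1]
  subst h
  simp only [List.concat_eq_append]
  set n : Int := ((c :: (mid ++ [d])).length : Int) with hn
  have hn2 : n = (mid.length : Int) + 2 := by simp [hn]; omega
  -- split the range: [0] ++ pyRange 1 (n-1) 1 ++ [n-1]
  have hsplit : PySem.List.pyRange 0 n 1
      = 0 :: (PySem.List.pyRange 1 (n - 1) 1 ++ [n - 1]) := by
    rw [PySem.List.pyRange_one_cons (by omega)]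
    rw [show n = (n - 1) + 1 by omega, PySem.List.pyRange_one_succ_right (by omega)]
    simp
  rw [hsplit]
  simp only [List.foldl_cons, List.foldl_append]
  have h0 : ((0 : Int) == 0 || (0 : Int) == n - 1) = true := by simp
  rw [h0]
  simp only [if_true]
  -- the middle loop appends exactly the characters at indices 1 .. n-2
  have hmid : ∀ (acc : List Char),
      (PySem.List.pyRange 1 (n - 1) 1).foldl
        (fun new_text i =>
          if i == 0 || i == n - 1 then new_text
          else new_text ++ (PySem.List.pyGet? (c :: (mid ++ [d])) i).toList) acc
      = acc ++ mid := by
    intro acc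
    have hcongr := PySem.List.foldl_congr_mem
      (l := PySem.List.pyRange 1 (n - 1) 1) (init := acc)
      (f := fun new_text i =>
          if i == 0 || i == n - 1 then new_text
          else new_text ++ (PySem.List.pyGet? (c :: (mid ++ [d])) i).toList)
      (g := fun new_text i =>
          new_text ++ [PySem.List.pyGetD (c :: mid) i ' '])
      (by
        intro acc' i hi
        rw [PySem.List.mem_pyRange_one] at hi
        obtain ⟨h1, h2⟩ := hi
        have hne : (i == 0 || i == n - 1) = false := by
          simp only [Bool.or_eq_false_iff, beq_eq_false_iff_ne]
          constructor <;> omega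
        simp only [hne, Bool.false_eq_true, if_false]
        congr 1
        have hi' : 0 ≤ i := by omega
        have hilt : i < ((c :: mid).length : Int) := by
          simp only [List.length_cons]; omega
        have hg : PySem.List.pyGet? (c :: (mid ++ [d])) i
            = some ((c :: (mid ++ [d]))[i.toNat]'(by simp; omega)) :=
          PySem.List.pyGet?_eq_some_getElem _ hi' (by simp; omega)
        have hg2 : PySem.List.pyGetD (c :: mid) i ' '
            = (c :: mid)[i.toNat]'(by simp; omega) := by
          simp only [PySem.List.pyGetD,
            PySem.List.pyGet?_eq_some_getElem (c :: mid) hi' hilt, Option.getD_some]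
        rw [hg, hg2]
        simp only [Option.toList_some, List.cons.injEq, and_true]
        have : (c :: (mid ++ [d]))[i.toNat]'(by simp; omega)
            = ((c :: mid) ++ [d])[i.toNat]'(by simp; omega) := by
          simp
        rw [this]
        exact (List.getElem_append_left (by simp; omega)))
    rw [hcongr]
    have hlen : ((c :: mid).length : Int) = n - 1 := by
      simp only [List.length_cons]; omega
    rw [← hlen]
    have hfold := PySem.List.foldl_pyRange_pyGetD' (c :: mid) ' '
      (fun (acc' : List Char) x => acc' ++ [x]) acc (a := 1) (by omega)
    beta_reduce at hfold
    rw [hfold]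
    simp only [Int.toNat_one, List.drop_one, List.tail_cons]
    exact foldl_append_id mid acc
  rw [hmid]
  have hlast : ((n - 1 : Int) == 0 || (n - 1 : Int) == n - 1) = true := by simp
  rw [hlast]
  simp only [if_true]
  simp

-- ===== VERDICT (by name: the statement is the Claim_ definition above) =====
theorem without_end_spec : Claim_equal_without_end := by
  intro text _
  unfold Spec_without_end without_end without_end_alt
  rw [slice_one_neg_one]
  congr 1
  have h : PySem.Str.len text = (text.toList.length : Int) := by
    simp [PySem.Str.len]
  rw [h]
  exact loop_eq text.toList
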